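-- pv_equiv track=rewrite | github.com/KonstantinosAng/CodeWars | Python/[7 kyu] the skiponacci sequence.py | skiponacci
-- ===== SOURCE A (Python) =====
-- memo = {}
--
-- def fib(n):
--   if n in memo:
--     value = memo[n]
--   else:
--     if n <= 1:
--       value = 1
--     else:
--       value = fib(n-1) + fib(n-2)
--       memo[n] = value
--   return value
--
-- def skiponacci(n):
--   rv = []
--   for i in range(n):
--     if i%2 != 0:
--       rv.append('skip')
--     else:
--       rv.append(str(fib(i)))
--   return ' '.join([x for x in rv])
-- ===== SOURCE B (Python) =====
-- def skiponacci(n):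
--     prev, cur = 0, 1
--     tokens = []
--     for i in range(n):
--         tokens.append('skip' if i % 2 != 0 else str(cur))
--         prev, cur = cur, prev + cur
--     return ' '.join(tokens)
-- ===== Notes on version B (the rewrite author's own statement) =====
-- stated objective: simpler
-- what changed: Replaces the recursive memoized fib helper and its global cache with a single loop maintaining a rolling (prev, cur) Fibonacci pair, appending tokens in the same pass.
import Mathlib
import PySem

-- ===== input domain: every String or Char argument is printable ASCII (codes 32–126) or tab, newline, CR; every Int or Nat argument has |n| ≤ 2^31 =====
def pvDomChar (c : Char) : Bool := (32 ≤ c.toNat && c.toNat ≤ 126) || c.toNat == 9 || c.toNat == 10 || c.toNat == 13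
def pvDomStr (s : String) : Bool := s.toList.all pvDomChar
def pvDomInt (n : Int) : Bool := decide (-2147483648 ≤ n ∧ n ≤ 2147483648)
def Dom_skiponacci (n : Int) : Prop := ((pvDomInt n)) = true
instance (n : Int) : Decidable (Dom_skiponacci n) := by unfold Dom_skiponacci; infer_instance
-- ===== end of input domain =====

-- B replaces the recursive memoized fib helper and its global cache with one loop holding a rolling (prev, cur) pair (objective: simpler).
-- A's memo dict is a module-level global in Python; since it only caches values fib itself computes, the
-- returned value is the same whether the memo starts empty or carries entries from earlier calls, so the
-- port threads a memo that starts empty at each skiponacci call.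

-- ===== PORT A =====
-- fib(n) with the memo threaded explicitly (Python mutates the global dict in place)
def fibMemo (memo : PySem.Dict Int Int) (n : Int) : Int × PySem.Dict Int Int :=
  match memo.get? n with
  | some v => (v, memo)
  | none =>
    if n ≤ 1 then (1, memo)
    else
      let (v1, m1) := fibMemo memo (n - 1)
      let (v2, m2) := fibMemo m1 (n - 2)
      (v1 + v2, m2.insert n (v1 + v2))
termination_by n.toNat
decreasing_by
  · omega
  · omega

def skiponacci (n : Int) : String :=
  let st := (PySem.List.pyRange 0 n 1).foldl
    (fun (st : List String × PySem.Dict Int Int) (i : Int) =>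
      if i % 2 ≠ 0 then (st.1 ++ ["skip"], st.2)
      else
        let (v, m) := fibMemo st.2 i
        (st.1 ++ [PySem.Int.toStr v], m))
    (([], PySem.Dict.empty) : List String × PySem.Dict Int Int)
  PySem.Str.join " " (st.1.map (fun x => x))

-- ===== PORT B =====
def skiponacci_alt (n : Int) : String :=
  let st := (PySem.List.pyRange 0 n 1).foldl
    (fun (st : List String × Int × Int) (i : Int) =>
      let (tokens, prev, cur) := st
      (tokens ++ [if i % 2 ≠ 0 then "skip" else PySem.Int.toStr cur], cur, prev + cur))
    (([], 0, 1) : List String × Int × Int)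
  PySem.Str.join " " st.1

-- ===== PRECONDITION & SPEC =====
def Spec_skiponacci (n : Int) (out : String) : Prop := out = skiponacci_alt n
instance (n : Int) (out : String) : Decidable (Spec_skiponacci n out) := by unfold Spec_skiponacci; infer_instance

-- ===== CLAIM (what is proved, stated in full; the proofs are below) =====
def Claim_equal_skiponacci : Prop := ∀ (n : Int), Dom_skiponacci n → Spec_skiponacci n (skiponacci n)

-- ===== LEMMAS AND PROOFS =====

-- proof-side reference fib (no memo)
def fibR (n : Int) : Int :=
  if n ≤ 1 then 1 else fibR (n - 1) + fibR (n - 2)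
termination_by n.toNat
decreasing_by
  · omega
  · omega

lemma fibR_base {n : Int} (h : n ≤ 1) : fibR n = 1 := by
  rw [fibR]; simp [h]

lemma fibR_step {n : Int} (h : ¬ n ≤ 1) : fibR n = fibR (n - 1) + fibR (n - 2) := by
  rw [fibR]; simp [h]

-- a memo is good if every entry is a true fibR value
def MemoGood (memo : PySem.Dict Int Int) : Prop :=
  ∀ k v, memo.get? k = some v → v = fibR k

lemma memoGood_empty : MemoGood PySem.Dict.empty := by
  intro k v h
  simp [PySem.Dict.empty, PySem.Dict.get?] at h

lemma fibMemo_correct : ∀ n memo, MemoGood memo →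
    (fibMemo memo n).1 = fibR n ∧ MemoGood (fibMemo memo n).2 := by
  have main : ∀ (t : Nat) (n : Int), n.toNat = t → ∀ memo, MemoGood memo →
      (fibMemo memo n).1 = fibR n ∧ MemoGood (fibMemo memo n).2 := by
    intro t
    induction t using Nat.strong_induction_on with
    | _ t ih =>
    intro n ht memo hmemo
    rw [fibMemo]
    cases hget : memo.get? n with
    | some v =>
      exact ⟨hmemo n v hget, hmemo⟩
    | none =>
      by_cases hle : n ≤ 1
      · simp only [hle, if_true]
        exact ⟨(fibR_base hle).symm, hmemo⟩
      · simp only [hle, if_false]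
        have h1 := ih (n - 1).toNat (by omega) (n - 1) rfl memo hmemo
        have h2 := ih (n - 2).toNat (by omega) (n - 2) rfl (fibMemo memo (n - 1)).2 h1.2
        refine ⟨?_, ?_⟩
        · simp only [h1.1, h2.1, fibR_step hle]
        · intro k v hkv
          by_cases hk : k = n
          · subst hk
            rw [PySem.Dict.get?_insert_self] at hkv
            injection hkv with hv
            rw [fibR_step hle, ← h1.1, ← h2.1]
            exact hv.symm
          · rw [PySem.Dict.get?_insert_of_ne _ _ hk] at hkv
            exact h2.2 k v hkv
  exact fun n memo h => main n.toNat n rfl memo h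

-- tokens produced by A's loop in terms of fibR only
def naiveTokens (k : Nat) : List String :=
  (PySem.List.pyRange 0 (k : Int) 1).foldl
    (fun rv i => if i % 2 ≠ 0 then rv ++ ["skip"] else rv ++ [PySem.Int.toStr (fibR i)]) []

lemma loopA_eq : ∀ k : Nat,
    ((PySem.List.pyRange 0 (k : Int) 1).foldl
      (fun (st : List String × PySem.Dict Int Int) (i : Int) =>
        if i % 2 ≠ 0 then (st.1 ++ ["skip"], st.2)
        else
          let (v, m) := fibMemo st.2 i
          (st.1 ++ [PySem.Int.toStr v], m))
      (([], PySem.Dict.empty) : List String × PySem.Dict Int Int)).1 = naiveTokens k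
    ∧ MemoGood ((PySem.List.pyRange 0 (k : Int) 1).foldl
      (fun (st : List String × PySem.Dict Int Int) (i : Int) =>
        if i % 2 ≠ 0 then (st.1 ++ ["skip"], st.2)
        else
          let (v, m) := fibMemo st.2 i
          (st.1 ++ [PySem.Int.toStr v], m))
      (([], PySem.Dict.empty) : List String × PySem.Dict Int Int)).2 := by
  intro k
  induction k with
  | zero =>
    refine ⟨rfl, memoGood_empty⟩
  | succ k ih =>
    have hk : (0 : Int) ≤ (k : Int) := by positivity
    have hsplit : PySem.List.pyRange 0 ((k : Int) + 1) 1
        = PySem.List.pyRange 0 (k : Int) 1 ++ [(k : Int)] :=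
      PySem.List.pyRange_one_succ_right hk
    have hcorr := fibMemo_correct (k : Int) _ ih.2
    push_cast
    rw [hsplit]
    unfold naiveTokens
    push_cast
    rw [hsplit, List.foldl_append, List.foldl_append]
    simp only [List.foldl]
    by_cases hpar : ((k : Int)) % 2 ≠ 0
    · refine ⟨?_, ?_⟩ <;> simp only [if_pos hpar]
      · rw [ih.1]; rfl
      · exact ih.2
    · refine ⟨?_, ?_⟩ <;> simp only [if_neg hpar]
      · show _ ++ [PySem.Int.toStr (fibMemo _ _).1] = naiveTokens k ++ [PySem.Int.toStr (fibR (k : Int))]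
        rw [ih.1, hcorr.1]
      · exact hcorr.2

-- the rolling pair: G 0 = 0, G 1 = 1, G (k+2) = G k + G (k+1); fibR k = G (k+1) for k : Nat
def G : Nat → Int
  | 0 => 0
  | 1 => 1
  | (k + 2) => G k + G (k + 1)

lemma G_add2 (k : Nat) : G (k + 2) = G k + G (k + 1) := rfl

lemma fibR_eq_G : ∀ k : Nat, fibR (k : Int) = G (k + 1) := by
  intro k
  induction k using Nat.strong_induction_on with
  | _ k ih =>
    match k with
    | 0 => simp [fibR_base, G]
    | 1 => norm_num [fibR_base, G]
    | (k + 2) =>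
      have h : ¬ ((k + 2 : Nat) : Int) ≤ 1 := by push_cast; omega
      rw [fibR_step h]
      have h1 : ((k + 2 : Nat) : Int) - 1 = ((k + 1 : Nat) : Int) := by push_cast; ring
      have h2 : ((k + 2 : Nat) : Int) - 2 = ((k : Nat) : Int) := by push_cast; ring
      rw [h1, h2, ih (k + 1) (by omega), ih k (by omega)]
      show G (k + 2) + G (k + 1) = G ((k + 1) + 2)
      rw [G_add2 (k + 1)]
      exact add_comm _ _

-- B's loop over range(0, k): tokens equal naiveTokens k and the pair is (G k, G (k+1))
lemma loopB_eq : ∀ k : Nat,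
    (PySem.List.pyRange 0 (k : Int) 1).foldl
      (fun (st : List String × Int × Int) (i : Int) =>
        let (tokens, prev, cur) := st
        (tokens ++ [if i % 2 ≠ 0 then "skip" else PySem.Int.toStr cur], cur, prev + cur))
      (([], 0, 1) : List String × Int × Int)
    = (naiveTokens k, G k, G (k + 1)) := by
  intro k
  induction k with
  | zero => simp [naiveTokens, G]
  | succ k ih =>
    have hk : (0 : Int) ≤ (k : Int) := by positivity
    have hsplit : PySem.List.pyRange 0 ((k : Int) + 1) 1
        = PySem.List.pyRange 0 (k : Int) 1 ++ [(k : Int)] :=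
      PySem.List.pyRange_one_succ_right hk
    push_cast
    rw [hsplit, List.foldl_append, ih]
    unfold naiveTokens
    push_cast
    rw [hsplit, List.foldl_append]
    simp only [List.foldl]
    by_cases hpar : ((k : Int)) % 2 ≠ 0 <;>
      simp [hpar, fibR_eq_G k, G_add2]

lemma pyRange_neg {n : Int} (h : n < 0) : PySem.List.pyRange 0 n 1 = [] :=
  PySem.List.pyRange_one_eq_nil (by omega)

-- ===== VERDICT (by name: the statement is the Claim_ definition above) =====
theorem skiponacci_spec : Claim_equal_skiponacci := by
  intro n _
  unfold Spec_skiponacci skiponacci skiponacci_alt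
  by_cases hn : 0 ≤ n
  · have hcast : n = ((n.toNat : Nat) : Int) := by omega
    rw [hcast, loopB_eq n.toNat]
    have hA := (loopA_eq n.toNat).1
    simp only [List.map_id']
    rw [hA]
  · rw [pyRange_neg (by omega)]
    simp
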